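-- pv_equiv track=rewrite | github.com/pattonga/Symmetric-Weakly-Separated-Collection-Generator | FindBreakers.py | orbit
-- ===== SOURCE A (Python) =====
-- from math import gcd
--
-- def add_mod(subset, l, n):
--     return tuple(sorted((x + l - 1) % n + 1 for x in subset))
--
-- def orbit(subset, l, n):
--     result = []
--     current = subset
--     seen = set()
--     for _ in range(n // gcd(n, l)):
--         frozen = tuple(sorted(current))
--         if frozen in seen:
--             break
--         seen.add(frozen)
--         result.append(frozen)
--         current = add_mod(current, l, n)
--     return result
-- ===== SOURCE B (Python) =====
-- from math import gcd
--
-- def orbit(subset, l, n):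
--     m = n // gcd(n, l)
--     if m <= 0:
--         return []
--     chain = [tuple(sorted(subset))]
--     chain += [tuple(sorted((x + k * l - 1) % n + 1 for x in subset)) for k in range(1, m)]
--     return list(dict.fromkeys(chain))
-- ===== Notes on version B (the rewrite author's own statement) =====
-- stated objective: alternative
-- what changed: B replaces A's iterated add_mod loop with seen-set and early break by a closed form: each chain element k is computed directly from subset as sorted((x + k*l - 1) % n + 1), the full n//gcd(n,l) chain is built by one comprehension and deduplicated once afterwards with dict.fromkeys (the full period is a multiple of the true period, so first-occurrence dedup yields exactly A's prefix).
-- outside the precondition, e.g. on orbit((1,), 0, 0): A raises ZeroDivisionError, B raises ZeroDivisionError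
import Mathlib
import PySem

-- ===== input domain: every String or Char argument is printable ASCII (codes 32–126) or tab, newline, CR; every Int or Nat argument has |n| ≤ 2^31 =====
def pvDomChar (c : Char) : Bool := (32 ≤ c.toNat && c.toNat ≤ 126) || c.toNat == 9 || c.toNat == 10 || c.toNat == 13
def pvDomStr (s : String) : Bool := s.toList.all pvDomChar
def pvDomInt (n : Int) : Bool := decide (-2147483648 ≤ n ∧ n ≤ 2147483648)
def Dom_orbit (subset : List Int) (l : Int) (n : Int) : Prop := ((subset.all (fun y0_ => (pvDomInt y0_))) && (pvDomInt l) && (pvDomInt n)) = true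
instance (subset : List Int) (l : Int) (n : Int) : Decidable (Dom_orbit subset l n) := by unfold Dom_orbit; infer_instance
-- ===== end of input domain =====

-- B replaces A's iterated add_mod loop with seen-set and early break by a closed form:
-- the k-th orbit element is computed directly as sorted((x + k*l - 1) % n + 1 for x in subset),
-- the full n//gcd(n,l)-chain is built by one comprehension and deduplicated once afterwards
-- (objective: alternative — genuinely different computation of each element, same cost class).

-- ===== PORT A =====
def addMod (subset : List Int) (l : Int) (n : Int) : List Int :=
  PySem.List.sorted (subset.map (fun x => PySem.Int.mod (x + l - 1) n + 1)) (fun x => x) false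

-- A's 'for _ in range(m)' loop with break, state (current, result, seen)
def orbitLoop (l : Int) (n : Int) : Nat → List Int → List (List Int) → PySem.Set (List Int) → List (List Int)
  | 0, _, result, _ => result
  | k+1, current, result, seen =>
    let frozen := PySem.List.sorted current (fun x => x) false
    if PySem.Set.contains seen frozen then result
    else orbitLoop l n k (addMod current l n) (result ++ [frozen]) (PySem.Set.add seen frozen)

def orbit (subset : List Int) (l : Int) (n : Int) : List (List Int) :=
  orbitLoop l n (PySem.Int.floordiv n ((Int.gcd n l : Int))).toNat subset [] PySem.Set.empty

-- ===== PORT B =====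
-- closed-form chain: head is sorted(subset) itself, element k (1 ≤ k < m) is computed
-- directly from subset as sorted((x + k*l - 1) % n + 1 for x in subset); dedup once at the end
def orbit_alt (subset : List Int) (l : Int) (n : Int) : List (List Int) :=
  let m := PySem.Int.floordiv n ((Int.gcd n l : Int))
  if m ≤ 0 then []
  else
    PySem.List.dedup
      (PySem.List.sorted subset (fun x => x) false ::
        (PySem.List.pyRange 1 m 1).map (fun k =>
          PySem.List.sorted (subset.map (fun x => PySem.Int.mod (x + k * l - 1) n + 1))
            (fun x => x) false))

-- ===== PRECONDITION & SPEC =====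
-- Pre_ excludes only n = 0 ∧ l = 0, where Python A raises ZeroDivisionError (n // gcd(n, l)).
def Pre_orbit (subset : List Int) (l : Int) (n : Int) : Prop := ¬ (n = 0 ∧ l = 0)
instance (subset : List Int) (l : Int) (n : Int) : Decidable (Pre_orbit subset l n) := by unfold Pre_orbit; infer_instance
def pvWitness_orbit : List Int × Int × Int := ([1, 2], 1, 4)

def Spec_orbit (subset : List Int) (l : Int) (n : Int) (out : List (List Int)) : Prop := out = orbit_alt subset l n
instance (subset : List Int) (l : Int) (n : Int) (out : List (List Int)) : Decidable (Spec_orbit subset l n out) := by unfold Spec_orbit; infer_instance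

-- ===== CLAIM (what is proved, stated in full; the proofs are below) =====
def Claim_equal_orbit : Prop := ∀ (subset : List Int) (l : Int) (n : Int), Dom_orbit subset l n → Pre_orbit subset l n → Spec_orbit subset l n (orbit subset l n)

-- ===== LEMMAS AND PROOFS =====

-- frozen(c) = tuple(sorted(c))
def pvFrozen (c : List Int) : List Int := PySem.List.sorted c (fun x => x) false

-- the k-th closed-form shift of subset
def pvShift (subset : List Int) (l n k : Int) : List Int :=
  subset.map (fun x => PySem.Int.mod (x + k * l - 1) n + 1)

-- iterated chain: sorted(current) at every step, advancing by addMod (proof-side bridge)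
def orbitGen (l : Int) (n : Int) : Nat → List Int → List (List Int)
  | 0, _ => []
  | k+1, current => pvFrozen current :: orbitGen l n k (addMod current l n)

-- sorted has no key, so it is invariant under permutation of its input
theorem addMod_frozen (c : List Int) (l n : Int) : addMod (pvFrozen c) l n = addMod c l n :=
  PySem.List.sorted_eq_sorted_of_perm _ _ (fun x => x) (fun _ _ h => h)
    ((PySem.List.sorted_perm c (fun x : Int => x) false).map _)

theorem frozen_frozen (c : List Int) : pvFrozen (pvFrozen c) = pvFrozen c :=
  PySem.List.sorted_sorted _ _

theorem frozen_addMod (c : List Int) (l n : Int) : pvFrozen (addMod c l n) = addMod c l n :=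
  PySem.List.sorted_sorted _ _

-- the generated chain only depends on the frozen start
theorem orbitGen_frozen (l n : Int) (k : Nat) (c : List Int) :
    orbitGen l n k (pvFrozen c) = orbitGen l n k c := by
  cases k with
  | zero => rfl
  | succ k =>
    show pvFrozen (pvFrozen c) :: orbitGen l n k (addMod (pvFrozen c) l n)
        = pvFrozen c :: orbitGen l n k (addMod c l n)
    rw [frozen_frozen, addMod_frozen]

theorem orbitLoop_frozen (l n : Int) (k : Nat) (c : List Int) (result : List (List Int)) (s : PySem.Set (List Int)) :
    orbitLoop l n k (pvFrozen c) result s = orbitLoop l n k c result s := by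
  cases k with
  | zero => rfl
  | succ k =>
    show (if PySem.Set.contains s (pvFrozen (pvFrozen c)) then result
          else orbitLoop l n k (addMod (pvFrozen c) l n) (result ++ [pvFrozen (pvFrozen c)]) (PySem.Set.add s (pvFrozen (pvFrozen c))))
        = (if PySem.Set.contains s (pvFrozen c) then result
          else orbitLoop l n k (addMod c l n) (result ++ [pvFrozen c]) (PySem.Set.add s (pvFrozen c)))
    rw [frozen_frozen, addMod_frozen]

-- interleaved dedup relative to a seen set (what A's append-if-new amounts to)
def dedupFrom (s : PySem.Set (List Int)) : List (List Int) → List (List Int)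
  | [] => []
  | a :: t => if PySem.Set.contains s a then dedupFrom s t else a :: dedupFrom (PySem.Set.add s a) t

theorem foldl_add_eq_append_dedupFrom : ∀ (xs : List (List Int)) (s : PySem.Set (List Int)),
    xs.foldl PySem.Set.add s = s ++ dedupFrom s xs := by
  intro xs
  induction xs with
  | nil => intro s; simp [dedupFrom]
  | cons a t ih =>
    intro s
    simp only [List.foldl_cons, dedupFrom]
    cases h : PySem.Set.contains s a with
    | true =>
      have hm : a ∈ s := (PySem.Set.contains_iff s a).mp h
      have hs : PySem.Set.add s a = s := by simp [PySem.Set.add, hm]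
      rw [hs, ih, if_pos rfl]
    | false =>
      have hm : a ∉ s := fun hm => by
        rw [(PySem.Set.contains_iff s a).mpr hm] at h; simp at h
      have hadd : PySem.Set.add s a = s ++ [a] := by simp [PySem.Set.add, hm]
      rw [ih, hadd]
      simp

theorem dedup_eq_dedupFrom_empty (xs : List (List Int)) :
    PySem.List.dedup xs = dedupFrom PySem.Set.empty xs := by
  rw [PySem.List.dedup_eq_ofList, PySem.Set.ofList_eq_foldl]
  simpa [PySem.Set.empty] using foldl_add_eq_append_dedupFrom xs PySem.Set.empty

-- once the current frozen value is already in a closed seen set, nothing new ever appears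
theorem dedupFrom_closed (l n : Int) : ∀ (k : Nat) (g : List Int) (s : PySem.Set (List Int)),
    pvFrozen g = g → g ∈ s → (∀ x ∈ s, addMod x l n ∈ s) →
    dedupFrom s (orbitGen l n k g) = [] := by
  intro k
  induction k with
  | zero => intro g s _ _ _; rfl
  | succ k ih =>
    intro g s hg hgs hcl
    show dedupFrom s (pvFrozen g :: orbitGen l n k (addMod g l n)) = []
    rw [hg]
    have hc : PySem.Set.contains s g = true := (PySem.Set.contains_iff s g).mpr hgs
    simp only [dedupFrom, hc, if_pos]
    exact ih (addMod g l n) s (frozen_addMod g l n) (hcl g hgs) hcl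

-- main invariant: A's loop = result ++ interleaved dedup of the iterated chain
theorem loop_eq_dedupFrom (l n : Int) : ∀ (k : Nat) (g : List Int) (result : List (List Int)) (s : PySem.Set (List Int)),
    pvFrozen g = g →
    (∀ x ∈ s, addMod x l n ∈ s ∨ addMod x l n = g) →
    orbitLoop l n k g result s = result ++ dedupFrom s (orbitGen l n k g) := by
  intro k
  induction k with
  | zero => intro g result s _ _; simp [orbitLoop, orbitGen, dedupFrom]
  | succ k ih =>
    intro g result s hg hinv
    show (if PySem.Set.contains s (pvFrozen g) then result
          else orbitLoop l n k (addMod g l n) (result ++ [pvFrozen g]) (PySem.Set.add s (pvFrozen g)))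
        = result ++ dedupFrom s (pvFrozen g :: orbitGen l n k (addMod g l n))
    rw [hg]
    by_cases hc : PySem.Set.contains s g = true
    · have hgs : g ∈ s := (PySem.Set.contains_iff s g).mp hc
      have hcl : ∀ x ∈ s, addMod x l n ∈ s := by
        intro x hx
        rcases hinv x hx with h | h
        · exact h
        · rw [h]; exact hgs
      have hgin : addMod g l n ∈ s := hcl g hgs
      simp only [hc, if_pos, dedupFrom]
      rw [dedupFrom_closed l n k (addMod g l n) s (frozen_addMod g l n) hgin hcl]
      simp
    · have hgs : g ∉ s := fun h => hc ((PySem.Set.contains_iff s g).mpr h)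
      have hinv' : ∀ x ∈ PySem.Set.add s g, addMod x l n ∈ PySem.Set.add s g ∨ addMod x l n = addMod g l n := by
        intro x hx
        rcases (PySem.Set.mem_add s g x).mp hx with hx' | hx'
        · rcases hinv x hx' with h | h
          · exact Or.inl ((PySem.Set.mem_add s g (addMod x l n)).mpr (Or.inl h))
          · exact Or.inl ((PySem.Set.mem_add s g (addMod x l n)).mpr (Or.inr h))
        · subst hx'; exact Or.inr rfl
      simp only [hc, if_neg, Bool.false_eq_true, not_false_iff, dedupFrom]
      rw [ih (addMod g l n) (result ++ [g]) (PySem.Set.add s g) (frozen_addMod g l n) hinv']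
      simp

-- advancing the k-th closed-form shift by addMod gives the frozen (k+1)-st shift (n > 0)
theorem addMod_shift (subset : List Int) (l n k : Int) (hn : 0 < n) :
    addMod (pvShift subset l n k) l n = pvFrozen (pvShift subset l n (k + 1)) := by
  unfold addMod pvShift pvFrozen
  rw [List.map_map]
  congr 2
  funext x
  show PySem.Int.mod (PySem.Int.mod (x + k * l - 1) n + 1 + l - 1) n + 1
      = PySem.Int.mod (x + (k + 1) * l - 1) n + 1
  rw [PySem.Int.mod_eq_emod_of_pos hn, PySem.Int.mod_eq_emod_of_pos hn,
      PySem.Int.mod_eq_emod_of_pos hn]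
  have h2 : x + (k + 1) * l - 1 = (x + k * l - 1) + l := by ring
  have key : ((x + k * l - 1) % n + 1 + l - 1) % n = ((x + k * l - 1) + l) % n := by
    have h3 : (x + k * l - 1) % n + 1 + l - 1 = (x + k * l - 1) % n + l := by ring
    rw [h3, Int.add_emod ((x + k * l - 1) % n) l, Int.emod_emod_of_dvd _ dvd_rfl,
        ← Int.add_emod]
  rw [key, h2]

-- the iterated chain starting from a closed-form shift is the closed-form chain (n > 0)
theorem gen_closed (subset : List Int) (l n : Int) (hn : 0 < n) :
    ∀ (j : Nat) (k : Int), orbitGen l n j (pvShift subset l n k)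
      = (PySem.List.pyRange k (k + j) 1).map (fun i => pvFrozen (pvShift subset l n i)) := by
  intro j
  induction j with
  | zero =>
    intro k
    rw [show (k + (0 : Nat)) = k by simp, PySem.List.pyRange_one_eq_nil le_rfl]
    rfl
  | succ j ih =>
    intro k
    show pvFrozen (pvShift subset l n k) :: orbitGen l n j (addMod (pvShift subset l n k) l n)
        = (PySem.List.pyRange k (k + (j + 1 : Nat)) 1).map (fun i => pvFrozen (pvShift subset l n i))
    have hcons : PySem.List.pyRange k (k + (j + 1 : Nat)) 1
        = k :: PySem.List.pyRange (k + 1) (k + (j + 1 : Nat)) 1 :=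
      PySem.List.pyRange_one_cons (by push_cast; omega)
    have harg : (k + 1) + (j : Int) = k + ((j + 1 : Nat) : Int) := by push_cast; ring
    rw [addMod_shift subset l n k hn, orbitGen_frozen, ih (k + 1), harg, hcons, List.map_cons]

-- the first advance: addMod subset = frozen of the closed-form shift at k = 1
theorem addMod_eq_shift_one (subset : List Int) (l n : Int) :
    addMod subset l n = pvFrozen (pvShift subset l n 1) := by
  unfold addMod pvShift pvFrozen
  congr 2
  funext x
  rw [one_mul]

-- m ≥ 1 forces n > 0 (gcd is positive once (n,l) ≠ (0,0))
theorem pos_of_floordiv_pos (l n : Int) (hnl : ¬ (n = 0 ∧ l = 0))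
    (hm : 0 < PySem.Int.floordiv n ((Int.gcd n l : Int))) : 0 < n := by
  have hg : 0 < ((Int.gcd n l : Int)) := by
    have : Int.gcd n l ≠ 0 := by
      intro h
      exact hnl ⟨Int.gcd_eq_zero_iff.mp h |>.1, Int.gcd_eq_zero_iff.mp h |>.2⟩
    exact_mod_cast Nat.pos_of_ne_zero this
  have h1 : (1 : Int) ≤ PySem.Int.floordiv n ((Int.gcd n l : Int)) := hm
  have := (PySem.Int.le_floordiv_iff_mul_le (a := n) (b := ((Int.gcd n l : Int))) (q := 1) hg).mp h1
  omega

-- ===== VERDICT (by name: the statement is the Claim_ definition above) =====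
theorem orbit_spec : Claim_equal_orbit := by
  intro subset l n _ hpre
  show orbit subset l n = orbit_alt subset l n
  unfold orbit orbit_alt
  set m := PySem.Int.floordiv n ((Int.gcd n l : Int)) with hm
  by_cases hm0 : m ≤ 0
  · rw [if_pos hm0, show m.toNat = 0 from Int.toNat_of_nonpos hm0]
    rfl
  · rw [if_neg hm0]
    have hmpos : 0 < m := by omega
    have hn : 0 < n := pos_of_floordiv_pos l n hpre (hm ▸ hmpos)
    -- A's loop = dedupFrom ∅ of the iterated chain
    rw [← orbitLoop_frozen,
        loop_eq_dedupFrom l n m.toNat (pvFrozen subset) [] PySem.Set.empty (frozen_frozen subset)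
          (by intro x hx; simp [PySem.Set.empty] at hx),
        orbitGen_frozen, List.nil_append, ← dedup_eq_dedupFrom_empty]
    -- iterated chain = B's closed-form chain
    congr 1
    have hk : m.toNat = (m.toNat - 1) + 1 := by omega
    rw [hk]
    show pvFrozen subset :: orbitGen l n (m.toNat - 1) (addMod subset l n)
        = PySem.List.sorted subset (fun x => x) false ::
            (PySem.List.pyRange 1 m 1).map (fun k =>
              PySem.List.sorted (subset.map (fun x => PySem.Int.mod (x + k * l - 1) n + 1)) (fun x => x) false)
    congr 1
    rw [addMod_eq_shift_one, orbitGen_frozen, gen_closed subset l n hn (m.toNat - 1) 1,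
        show (1 : Int) + ((m.toNat - 1 : Nat) : Int) = m by omega]
    rfl
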